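-- pv_equiv track=rewrite | github.com/LinInFal/-math-logic-and-algorithms-theory | lab6/lab7.py | task_1d
-- ===== SOURCE A (Python) =====
-- def task_1d(n, words):
--     def is_vowel(char):
--         return char in 'aeiouy'
--
--     def count_diphthongs(word):
--         count = 0
--         word_len = len(word)
--
--         for i in range(word_len - 1):
--             if is_vowel(word[i]) and is_vowel(word[i + 1]):
--                 if (i == 0 or not is_vowel(word[i - 1])) and (i + 2 == word_len or not is_vowel(word[i + 2])):
--                     count += 1
--         return count
--
--     max_diphthongs = 0
--     diphthong_counts = []
--
--     for w in words:
--         count = count_diphthongs(w)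
--         diphthong_counts.append(count)
--         if count > max_diphthongs:
--             max_diphthongs = count
--
--     return [words[i] for i in range(n) if diphthong_counts[i] == max_diphthongs]
-- ===== SOURCE B (Python) =====
-- def task_1d(n, words):
--     def is_vowel(char):
--         return char in 'aeiouy'
--
--     def count_diphthongs(word):
--         # count maximal runs of consecutive vowels whose length is exactly 2
--         count = 0
--         run = 0
--         for ch in word:
--             if is_vowel(ch):
--                 run += 1
--             else:
--                 if run == 2:
--                     count += 1
--                 run = 0
--         if run == 2:
--             count += 1
--         return count
--
--     counts = [count_diphthongs(w) for w in words]
--     m = max(counts, default=0)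
--     return [w for i, (w, c) in enumerate(zip(words, counts)) if i < n and c == m]
-- ===== Notes on version B (the rewrite author's own statement) =====
-- stated objective: idiomatic
-- what changed: count_diphthongs is rewritten as a single pass with a running vowel-run counter that counts maximal vowel runs of length exactly 2 (instead of per-index four-neighbour checks with word[i-1]/word[i+2]), the maximum is taken with max(counts, default=0), and the result is built by an enumerate/zip comprehension instead of indexing two parallel lists with range(n).
-- outside the precondition, e.g. on task_1d(3, ['a']): A raises IndexError, B returns ['a']
-- crash fix: On inputs with n > len(words), A raises IndexError at diphthong_counts[i]; B returns the words among the first n (hence all of them) whose diphthong count is maximal. — e.g. on task_1d(3, ["a"]): A raises IndexError, B returns ["a"]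
import Mathlib
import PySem

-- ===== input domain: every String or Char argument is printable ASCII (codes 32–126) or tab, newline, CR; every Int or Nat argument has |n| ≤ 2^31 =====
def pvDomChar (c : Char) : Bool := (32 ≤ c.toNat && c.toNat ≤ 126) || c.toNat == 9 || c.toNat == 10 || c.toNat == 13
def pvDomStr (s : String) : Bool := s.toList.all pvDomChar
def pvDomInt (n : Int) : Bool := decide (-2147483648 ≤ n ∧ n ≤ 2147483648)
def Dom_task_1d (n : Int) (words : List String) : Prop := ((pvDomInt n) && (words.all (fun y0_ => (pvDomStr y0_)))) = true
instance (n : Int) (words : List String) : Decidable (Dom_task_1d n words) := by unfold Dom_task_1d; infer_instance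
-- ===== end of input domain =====

-- B counts diphthongs by scanning each word once with a running vowel-run counter (runs of
-- length exactly 2) instead of A's four-neighbour index checks, takes the maximum with
-- max(counts, default=0), and builds the result by an enumerate/zip comprehension instead of
-- indexing two parallel lists by range(n); objective: idiomatic, same asymptotic cost.

-- ===== PORT A =====
-- is_vowel (identical helper in both Pythons): char in 'aeiouy'
def pvIsVowel (c : Char) : Bool := "aeiouy".toList.contains c

-- count_diphthongs from A: loop over range(len(word)-1) with neighbour index checks
def pvCountDiphA (word : String) : Int :=
  let cs := word.toList
  let wl : Int := cs.length
  (PySem.List.pyRange 0 (wl - 1) 1).foldl (fun count i =>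
    if pvIsVowel (PySem.List.pyGetD cs i ' ') && pvIsVowel (PySem.List.pyGetD cs (i + 1) ' ') then
      -- Python's `i == 0 or …` short-circuits before reading word[i-1]; the pyGetD value at
      -- i-1 = -1 is never used when i = 0 because the left disjunct is already true.
      if (i == 0 || !pvIsVowel (PySem.List.pyGetD cs (i - 1) ' ')) &&
         (i + 2 == wl || !pvIsVowel (PySem.List.pyGetD cs (i + 2) ' ')) then count + 1
      else count
    else count) 0

def task_1d (n : Int) (words : List String) : List String :=
  -- state: (max_diphthongs, diphthong_counts)
  let st := words.foldl (fun (st : Int × List Int) w =>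
    let count := pvCountDiphA w
    ((if count > st.1 then count else st.1), st.2 ++ [count])) (0, ([] : List Int))
  -- [words[i] for i in range(n) if diphthong_counts[i] == max_diphthongs]
  -- pyGetD is exact here: Pre_task_1d puts every i of range(n) in range of both lists.
  (PySem.List.pyRange 0 n 1).foldl (fun acc i =>
    if PySem.List.pyGetD st.2 i 0 = st.1 then acc ++ [PySem.List.pyGetD words i ""] else acc) []

-- ===== PORT B =====
-- count_diphthongs from B: one pass with a running vowel-run length, count runs of length exactly 2
def pvCountDiphB (word : String) : Int :=
  let st := word.toList.foldl (fun (st : Int × Int) ch =>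
    if pvIsVowel ch then (st.1, st.2 + 1)
    else ((if st.2 = 2 then st.1 + 1 else st.1), 0)) (0, 0)
  if st.2 = 2 then st.1 + 1 else st.1

def task_1d_alt (n : Int) (words : List String) : List String :=
  let counts := words.map pvCountDiphB
  let m := PySem.List.maxD counts (fun x => x) 0
  ((PySem.List.enumerate (words.zip counts) 0).filter
      (fun p => decide (p.1 < n) && decide (p.2.2 = m))).map (fun p => p.2.1)

-- ===== PRECONDITION & SPEC =====
-- Pre_ excludes n > len(words), where A's indexing diphthong_counts[i] raises IndexError.
def Pre_task_1d (n : Int) (words : List String) : Prop := n ≤ words.length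
instance (n : Int) (words : List String) : Decidable (Pre_task_1d n words) := by
  unfold Pre_task_1d; infer_instance
def pvWitness_task_1d : Int × List String := (1, ["ae"])

-- On inputs with n > len(words), A raises IndexError while B returns the words among the
-- first n (hence all of them) with maximal diphthong count.
def Raises_task_1d (n : Int) (words : List String) : Prop := (words.length : Int) < n
instance (n : Int) (words : List String) : Decidable (Raises_task_1d n words) := by
  unfold Raises_task_1d; infer_instance
def pvRaiseWitness_task_1d : Int × List String := (3, ["a"])
def pvRaiseWitnessOut_task_1d : List String := ["a"]

def Spec_task_1d (n : Int) (words : List String) (out : List String) : Prop := out = task_1d_alt n words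
instance (n : Int) (words : List String) (out : List String) : Decidable (Spec_task_1d n words out) := by unfold Spec_task_1d; infer_instance

-- ===== CLAIM (what is proved, stated in full; the proofs are below) =====
def Claim_equal_task_1d : Prop := ∀ (n : Int) (words : List String), Dom_task_1d n words → Pre_task_1d n words → Spec_task_1d n words (task_1d n words)
def Claim_raises_task_1d : Prop := (∀ (n : Int) (words : List String), Dom_task_1d n words → Raises_task_1d n words → ¬ Pre_task_1d n words) ∧ (Dom_task_1d (pvRaiseWitness_task_1d.1) (pvRaiseWitness_task_1d.2) ∧ Raises_task_1d (pvRaiseWitness_task_1d.1) (pvRaiseWitness_task_1d.2) ∧ task_1d_alt (pvRaiseWitness_task_1d.1) (pvRaiseWitness_task_1d.2) = pvRaiseWitnessOut_task_1d)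

-- ===== LEMMAS AND PROOFS =====

-- Structural recursion equivalent of A's per-index diphthong test: pv = "previous char is a vowel".
def pvARec (pv : Bool) : List Char → Int
  | [] => 0
  | [_] => 0
  | c :: d :: t =>
    (if pvIsVowel c && pvIsVowel d && !pv &&
        (match t with | [] => true | e :: _ => !pvIsVowel e) then 1 else 0)
      + pvARec (pvIsVowel c) (d :: t)

-- Structural recursion equivalent of B's running-run counter.
def pvBRec (run : Int) : List Char → Int
  | [] => if run = 2 then 1 else 0
  | c :: t =>
    if pvIsVowel c then pvBRec (run + 1) t
    else (if run = 2 then 1 else 0) + pvBRec 0 t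

-- length of the maximal vowel prefix
def pvLead : List Char → Int
  | [] => 0
  | c :: t => if pvIsVowel c then pvLead t + 1 else 0

lemma pvLead_nonneg (t : List Char) : 0 ≤ pvLead t := by
  induction t with
  | nil => simp [pvLead]
  | cons c t ih => by_cases h : pvIsVowel c <;> simp [pvLead, h] <;> omega

lemma pvB_foldl (l : List Char) : ∀ (count run : Int),
    (let st := l.foldl (fun (st : Int × Int) ch =>
        if pvIsVowel ch then (st.1, st.2 + 1)
        else ((if st.2 = 2 then st.1 + 1 else st.1), 0)) (count, run)
     if st.2 = 2 then st.1 + 1 else st.1) = count + pvBRec run l := by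
  induction l with
  | nil => intro count run; simp [pvBRec]; omega
  | cons c t ih =>
    intro count run
    by_cases h : pvIsVowel c
    · simpa [List.foldl_cons, h, pvBRec] using ih count (run + 1)
    · by_cases h2 : run = 2 <;> simp [List.foldl_cons, h, pvBRec, h2, ih] <;> omega

lemma pvBRec_eq_pvARec : ∀ t : List Char,
    (pvBRec 0 t = pvARec false t) ∧
    (∀ run : Int, 1 ≤ run →
      pvBRec run t = pvARec true t + (if run + pvLead t = 2 then 1 else 0)) := by
  intro t
  induction t with
  | nil =>
    refine ⟨by simp [pvBRec, pvARec], fun run _ => ?_⟩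
    simp [pvBRec, pvARec, pvLead]
  | cons c t ih =>
    obtain ⟨ih0, ih1⟩ := ih
    constructor
    · -- run = 0
      by_cases hc : pvIsVowel c
      · -- bRec 1 t
        cases t with
        | nil => simp [pvBRec, pvARec, hc]
        | cons d t' =>
          have h1 := ih1 1 (by omega)
          rw [pvBRec, if_pos hc, show (0:Int)+1 = 1 by norm_num, h1]
          by_cases hd : pvIsVowel d
          · cases t' with
            | nil => simp [pvARec, pvLead, hc, hd]
            | cons e t'' =>
              by_cases he : pvIsVowel e
              · have := pvLead_nonneg t''
                simp [pvARec, pvLead, hc, hd, he]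
                omega
              · simp [pvARec, pvLead, hc, hd, he]
                omega
          · simp [pvARec, pvLead, hc, hd]
      · cases t with
        | nil => simp [pvBRec, pvARec, hc]
        | cons d t' =>
          rw [pvBRec]; rw [if_neg hc]
          simp [pvARec, hc, ih0]
    · -- run ≥ 1
      intro run hrun
      by_cases hc : pvIsVowel c
      · cases t with
        | nil =>
          simp [pvBRec, pvARec, pvLead, hc]
        | cons d t' =>
          have h1 := ih1 (run + 1) (by omega)
          rw [pvBRec, if_pos hc, h1]
          simp only [pvARec, pvLead, hc]
          simp
          omega
      · cases t with
        | nil => simp [pvBRec, pvARec, pvLead, hc]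
        | cons d t' =>
          rw [pvBRec]; rw [if_neg hc]
          simp [pvARec, pvLead, hc, ih0]
          omega

-- the Bool predicate A's inner loop tests at (integer) index i
def pvPA (cs : List Char) (i : Int) : Bool :=
  (pvIsVowel (PySem.List.pyGetD cs i ' ') && pvIsVowel (PySem.List.pyGetD cs (i + 1) ' ')) &&
  ((i == 0 || !pvIsVowel (PySem.List.pyGetD cs (i - 1) ' ')) &&
   (i + 2 == (cs.length : Int) || !pvIsVowel (PySem.List.pyGetD cs (i + 2) ' ')))

-- the same predicate over a Nat index, with prev-vowel flag pv for index 0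
def pvPG (pv : Bool) (cs : List Char) (k : Nat) : Bool :=
  (pvIsVowel (cs.getD k ' ') && pvIsVowel (cs.getD (k + 1) ' ')) &&
  ((if k = 0 then !pv else !pvIsVowel (cs.getD (k - 1) ' ')) &&
   ((k + 2 = cs.length : Bool) || !pvIsVowel (cs.getD (k + 2) ' ')))

lemma pvIntBeqNat (a b : Nat) : ((a : Int) == (b : Int)) = decide (a = b) := by
  rw [Bool.eq_iff_iff]; simp

lemma pvPA_eq_pvPG (cs : List Char) (k : Nat) : pvPA cs (k : Int) = pvPG false cs k := by
  unfold pvPA pvPG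
  cases k with
  | zero =>
    have h2 : ((0 : Nat) : Int) + 2 = ((2 : Nat) : Int) := by norm_num
    have h1 : ((0 : Nat) : Int) + 1 = ((1 : Nat) : Int) := by norm_num
    simp only [h1, h2, pvIntBeqNat, PySem.List.pyGetD_natCast]
    simp
  | succ k' =>
    have h1 : ((k' + 1 : Nat) : Int) - 1 = (k' : Int) := by push_cast; ring
    have h2 : ((k' + 1 : Nat) : Int) + 1 = ((k' + 2 : Nat) : Int) := by push_cast; ring
    have h3 : ((k' + 1 : Nat) : Int) + 2 = ((k' + 3 : Nat) : Int) := by push_cast; ring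
    have h4 : ((((k' + 1 : Nat) : Int)) == ((0 : Nat) : Int)) = decide (k' + 1 = 0) :=
      pvIntBeqNat (k' + 1) 0
    have h0 : ((0 : Nat) : Int) = (0 : Int) := rfl
    rw [h1, h2, h3, ← h0, h4, pvIntBeqNat]
    simp only [PySem.List.pyGetD_natCast]
    have : decide (k' + 1 = 0) = false := by simp
    rw [this]
    simp [Nat.add_assoc]

lemma pvPG_shift (pv : Bool) (c : Char) (cs : List Char) (k : Nat) :
    pvPG pv (c :: cs) (k + 1) = pvPG (pvIsVowel c) cs k := by
  unfold pvPG
  cases k with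
  | zero => simp [eq_comm]
  | succ k' =>
    have : (c :: cs).length = cs.length + 1 := by simp
    simp [this, eq_comm]

lemma pvCountPG : ∀ (cs : List Char) (pv : Bool),
    ((List.range (cs.length - 1)).countP (pvPG pv cs) : Int) = pvARec pv cs := by
  intro cs
  induction cs with
  | nil => intro pv; simp [pvARec]
  | cons c t ih =>
    intro pv
    cases t with
    | nil => simp [pvARec]
    | cons d t' =>
      have hlen : (c :: d :: t').length - 1 = t'.length + 1 := by simp
      rw [hlen, List.range_succ_eq_map, List.countP_cons, List.countP_map]
      have hshift : (pvPG pv (c :: d :: t') ∘ Nat.succ) = pvPG (pvIsVowel c) (d :: t') := by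
        funext k
        simpa using pvPG_shift pv c (d :: t') k
      rw [hshift]
      cases t' with
      | nil =>
        have h0 : pvPG pv [c, d] 0 = (pvIsVowel c && pvIsVowel d && !pv) := by
          unfold pvPG; simp
        rw [h0]
        simp [pvARec]
      | cons e t'' =>
        have h0 : pvPG pv (c :: d :: e :: t'') 0 =
            (pvIsVowel c && pvIsVowel d && !pv && !pvIsVowel e) := by
          unfold pvPG; simp [Bool.and_assoc]
        have hE : (d :: e :: t'').length - 1 = (e :: t'').length := by simp
        have ih' := ih (pvIsVowel c)
        rw [hE] at ih'
        rw [h0]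
        have ha : pvARec pv (c :: d :: e :: t'') =
            (if (pvIsVowel c && pvIsVowel d && !pv && !pvIsVowel e) then (1:Int) else 0)
              + pvARec (pvIsVowel c) (d :: e :: t'') := rfl
        rw [ha, ← ih']
        push_cast
        by_cases hb : (pvIsVowel c && pvIsVowel d && !pv && !pvIsVowel e) = true <;>
          simp [hb] <;> omega

lemma pvIteIteAnd (a b : Bool) (x : Int) :
    (if a then (if b then x + 1 else x) else x) = if (a && b) then x + 1 else x := by
  cases a <;> cases b <;> simp

lemma pvCountA_eq_countP (word : String) :
    pvCountDiphA word =
      ((List.range (word.toList.length - 1)).countP (pvPG false word.toList) : Int) := by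
  unfold pvCountDiphA
  simp only []
  have hbody : (fun (count : Int) (i : Int) =>
      if pvIsVowel (PySem.List.pyGetD word.toList i ' ') &&
         pvIsVowel (PySem.List.pyGetD word.toList (i + 1) ' ') then
        if (i == 0 || !pvIsVowel (PySem.List.pyGetD word.toList (i - 1) ' ')) &&
           (i + 2 == (word.toList.length : Int) ||
             !pvIsVowel (PySem.List.pyGetD word.toList (i + 2) ' ')) then count + 1
        else count
      else count)
      = fun (count : Int) (i : Int) => if pvPA word.toList i then count + 1 else count := by
    funext count i
    rw [pvIteIteAnd]
    rfl
  rw [hbody, PySem.List.foldl_if_add_one, PySem.List.pyRange_one]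
  have hT : ((word.toList.length : Int) - 1 - 0).toNat = word.toList.length - 1 := by omega
  rw [hT, List.countP_map]
  have hcong : ∀ k ∈ List.range (word.toList.length - 1),
      ((pvPA word.toList ∘ fun k : Nat => 0 + (k : Int)) k = true ↔ pvPG false word.toList k = true) := by
    intro k _
    simp only [Function.comp, zero_add]
    rw [pvPA_eq_pvPG word.toList k]
  rw [List.countP_congr hcong]
  ring

lemma pvCount_eq (word : String) : pvCountDiphA word = pvCountDiphB word := by
  rw [pvCountA_eq_countP, pvCountPG]
  unfold pvCountDiphB
  have h := pvB_foldl word.toList 0 0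
  simp only [] at h ⊢
  rw [h, (pvBRec_eq_pvARec word.toList).1]
  ring

lemma pvCount_nonneg (word : String) : 0 ≤ pvCountDiphB word := by
  rw [← pvCount_eq, pvCountA_eq_countP]
  exact Int.natCast_nonneg _

lemma pvA_loop (ws : List String) : ∀ (m : Int) (acc : List Int),
    ws.foldl (fun (st : Int × List Int) w =>
      let count := pvCountDiphA w
      ((if count > st.1 then count else st.1), st.2 ++ [count])) (m, acc)
      = (List.foldl (fun m c => if c > m then c else m) m (ws.map pvCountDiphA),
         acc ++ ws.map pvCountDiphA) := by
  induction ws with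
  | nil => intro m acc; simp
  | cons w t ih => intro m acc; simp [ih]

lemma pvStep_eq_max : (fun (m c : Int) => if c > m then c else m) = max := by
  funext m c
  by_cases h : c > m <;> simp [h, max_def] <;> omega

lemma pvMax_eq (l : List Int) (hnn : ∀ x ∈ l, 0 ≤ x) :
    List.foldl (fun m c => if c > m then c else m) 0 l
      = PySem.List.maxD l (fun x => x) 0 := by
  rw [pvStep_eq_max]
  cases l with
  | nil => simp [PySem.List.maxD, PySem.List.max?]
  | cons x t =>
    unfold PySem.List.maxD
    rw [PySem.List.max?_id_cons]
    have hx : max 0 x = x := max_eq_right (hnn x (by simp))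
    simp [hx]

-- pyGetD into a zip of two equal-length lists
lemma pvZip_getD (ws : List String) (cs : List Int) (hl : cs.length = ws.length)
    (j : Int) (h0 : 0 ≤ j) (hj : j < (ws.length : Int)) :
    PySem.List.pyGetD (ws.zip cs) j ("", 0)
      = (PySem.List.pyGetD ws j "", PySem.List.pyGetD cs j 0) := by
  have hz : (ws.zip cs).length = ws.length := by simp [List.length_zip, hl]
  rw [PySem.List.pyGetD_eq_getElem _ _ h0 (by omega),
      PySem.List.pyGetD_eq_getElem _ _ h0 (by omega),
      PySem.List.pyGetD_eq_getElem _ _ h0 (by omega)]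
  exact List.getElem_zip (i := j.toNat)

-- ===== VERDICT (by name: the statement is the Claim_ definition above) =====
lemma pvFilter_final (n : Int) (words : List String) (hpre : n ≤ (words.length : Int)) :
    (PySem.List.pyRange 0 n 1).foldl (fun acc i =>
        if PySem.List.pyGetD (words.map pvCountDiphB) i 0
             = PySem.List.maxD (words.map pvCountDiphB) (fun x => x) 0
        then acc ++ [PySem.List.pyGetD words i ""] else acc) []
      = ((PySem.List.enumerate (words.zip (words.map pvCountDiphB)) 0).filter
          (fun p => decide (p.1 < n) &&
            decide (p.2.2 = PySem.List.maxD (words.map pvCountDiphB) (fun x => x) 0))).map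
          (fun p => p.2.1) := by
  set cs := words.map pvCountDiphB with hcs
  set M := PySem.List.maxD cs (fun x => x) 0 with hM
  have hl : cs.length = words.length := by simp [hcs]
  have hz : (words.zip cs).length = words.length := by simp [List.length_zip, hl]
  -- LHS to filter/map form
  have hbody : (fun (acc : List String) (i : Int) =>
      if PySem.List.pyGetD cs i 0 = M then acc ++ [PySem.List.pyGetD words i ""] else acc)
      = fun acc i => if (decide (PySem.List.pyGetD cs i 0 = M)) = true
          then acc ++ [PySem.List.pyGetD words i ""] else acc := by
    funext acc i; simp
  rw [hbody, PySem.List.foldl_append_if (fun i => decide (PySem.List.pyGetD cs i 0 = M))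
      (fun i => PySem.List.pyGetD words i "")]
  -- RHS to filter/map over a range
  rw [PySem.List.enumerate_eq_map_pyRange (words.zip cs) ("", 0), List.filter_map,
      List.map_map]
  have hlen : PySem.List.len (words.zip cs) = (words.length : Int) := by
    simp [PySem.List.len_eq, hz]
  rw [hlen]
  by_cases hn : n ≤ 0
  · rw [PySem.List.pyRange_one_eq_nil hn]
    have : List.filter
        ((fun p => decide (p.1 < n) && decide (p.2.2 = M)) ∘
          fun j => (j, PySem.List.pyGetD (words.zip cs) j ("", 0)))
        (PySem.List.pyRange 0 (words.length : Int) 1) = [] := by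
      rw [List.filter_eq_nil_iff]
      intro j hj
      have := (PySem.List.mem_pyRange_one).1 hj
      simp only [Function.comp]
      have : ¬ (j < n) := by omega
      simp [this]
    rw [this]
    simp
  · push_neg at hn
    rw [PySem.List.pyRange_one_append 0 n (words.length : Int) (by omega) hpre,
        List.filter_append]
    have h2 : List.filter
        ((fun p => decide (p.1 < n) && decide (p.2.2 = M)) ∘
          fun j => (j, PySem.List.pyGetD (words.zip cs) j ("", 0)))
        (PySem.List.pyRange n (words.length : Int) 1) = [] := by
      rw [List.filter_eq_nil_iff]
      intro j hj
      have := (PySem.List.mem_pyRange_one).1 hj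
      have : ¬ (j < n) := by omega
      simp [Function.comp, this]
    rw [h2, List.append_nil]
    have h1 : List.filter
        ((fun p => decide (p.1 < n) && decide (p.2.2 = M)) ∘
          fun j => (j, PySem.List.pyGetD (words.zip cs) j ("", 0)))
        (PySem.List.pyRange 0 n 1)
        = List.filter (fun i => decide (PySem.List.pyGetD cs i 0 = M))
            (PySem.List.pyRange 0 n 1) := by
      apply List.filter_congr
      intro j hj
      have hjr := (PySem.List.mem_pyRange_one).1 hj
      have hget := pvZip_getD words cs hl j (by omega) (by omega)
      simp [Function.comp, hget, hjr.2]
    rw [h1]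
    apply List.map_congr_left
    intro j hj
    have hjr := (PySem.List.mem_pyRange_one).1 (List.mem_of_mem_filter hj)
    have hget := pvZip_getD words cs hl j (by omega) (by omega)
    simp [Function.comp, hget]

theorem task_1d_spec : Claim_equal_task_1d := by
  intro n words _ hpre
  unfold Spec_task_1d task_1d task_1d_alt Pre_task_1d at *
  simp only []
  rw [pvA_loop words 0 []]
  have hmap : words.map pvCountDiphA = words.map pvCountDiphB :=
    List.map_congr_left (fun w _ => pvCount_eq w)
  have hmax : List.foldl (fun m c => if c > m then c else m) 0 (words.map pvCountDiphB)
      = PySem.List.maxD (words.map pvCountDiphB) (fun x => x) 0 := by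
    have hnn : ∀ x ∈ words.map pvCountDiphB, 0 ≤ x := by
      intro x hx
      obtain ⟨w, hw, rfl⟩ := List.mem_map.1 hx
      exact pvCount_nonneg w
    exact pvMax_eq _ hnn
  simp only [hmap, hmax, List.nil_append]
  exact pvFilter_final n words hpre

def task_1d_raises : Claim_raises_task_1d := by
  unfold Claim_raises_task_1d
  constructor
  · intro n words _ hr hp
    exact absurd hp (by unfold Pre_task_1d Raises_task_1d at *; omega)
  · exact ⟨by decide, by decide, by decide⟩
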